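-- pv_equiv track=rewrite | github.com/PLab-SI/PicoQuake | python/picoquake/utils.py | deque_slice
-- ===== SOURCE A (Python) =====
-- from collections import deque
-- from typing import List, Any, Optional
--
-- def deque_slice(dq: deque, start: Optional[int], end: Optional[int] = None) -> List[Any]:
--     """
--     Return a slice from the deque. Behaves like the list slice method.
--
--     Args:
--     dq: The deque to slice.
--     start: The starting index of the slice.
--     end : The ending index of the slice.
--
--     Returns:
--     deque: A deque containing the specified slice.
--     """
--     if start is None:
--         start = 0
--     if end is None:
--         end = len(dq)
--     if start < 0:
--         start = len(dq) + start
--     if end < 0: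
--         end = len(dq) + end
--     if start < 0:
--         start = 0
--     if end > len(dq):
--         end = len(dq)
--     return [dq[i] for i in range(start, end)]
-- ===== SOURCE B (Python) =====
-- from collections import deque
-- from typing import List, Any, Optional
--
-- def deque_slice(dq: deque, start: Optional[int], end: Optional[int] = None) -> List[Any]:
--     """Return a slice from the deque, like list slicing."""
--     return list(dq)[start:end]
-- ===== Notes on version B (the rewrite author's own statement) =====
-- stated objective: simpler
-- what changed: B drops A's hand-written None-defaulting/negative-wrap/clamp branch ladder and per-index comprehension, delegating all index math to Python's built-in list slice.
import Mathlib
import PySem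

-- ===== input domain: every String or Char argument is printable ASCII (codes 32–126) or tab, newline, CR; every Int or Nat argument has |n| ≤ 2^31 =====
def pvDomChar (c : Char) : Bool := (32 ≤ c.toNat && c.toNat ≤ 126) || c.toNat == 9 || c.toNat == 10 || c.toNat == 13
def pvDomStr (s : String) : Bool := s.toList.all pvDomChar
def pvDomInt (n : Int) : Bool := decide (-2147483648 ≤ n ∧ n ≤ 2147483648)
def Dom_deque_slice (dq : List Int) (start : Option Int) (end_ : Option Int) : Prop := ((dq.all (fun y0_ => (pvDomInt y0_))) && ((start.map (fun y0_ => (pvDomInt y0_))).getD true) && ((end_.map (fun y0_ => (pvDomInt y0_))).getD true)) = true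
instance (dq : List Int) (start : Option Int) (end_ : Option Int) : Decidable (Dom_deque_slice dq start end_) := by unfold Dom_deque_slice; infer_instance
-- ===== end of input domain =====

-- B replaces A's hand-written None-defaulting / negative-wrap / clamp branch ladder and
-- per-index comprehension by a single built-in list slice (simpler, same result).


-- ===== PORT A =====
-- Literal transliteration of A: default the bounds, wrap negatives, clamp, then
-- build the result by indexing over range(start, end).  Every index produced by the
-- range is in bounds for dq, so pyGetD's default 0 is never used (dq[i] never raises).
def deque_slice (dq : List Int) (start : Option Int) (end_ : Option Int) : List Int :=
  let s0 : Int := match start with | none => 0 | some s => s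
  let e0 : Int := match end_ with | none => (dq.length : Int) | some e => e
  let s1 : Int := if s0 < 0 then (dq.length : Int) + s0 else s0
  let e1 : Int := if e0 < 0 then (dq.length : Int) + e0 else e0
  let s2 : Int := if s1 < 0 then 0 else s1
  let e2 : Int := if e1 > (dq.length : Int) then (dq.length : Int) else e1
  (PySem.List.pyRange s2 e2 1).map (fun i => PySem.List.pyGetD dq i 0)

-- ===== PORT B =====
-- Literal transliteration of B: list(dq)[start:end].
def deque_slice_alt (dq : List Int) (start : Option Int) (end_ : Option Int) : List Int :=
  PySem.List.slice dq start end_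

-- ===== PRECONDITION & SPEC =====
def Spec_deque_slice (dq : List Int) (start : Option Int) (end_ : Option Int) (out : List Int) : Prop := out = deque_slice_alt dq start end_
instance (dq : List Int) (start : Option Int) (end_ : Option Int) (out : List Int) : Decidable (Spec_deque_slice dq start end_ out) := by unfold Spec_deque_slice; infer_instance

-- ===== CLAIM (what is proved, stated in full; the proofs are below) =====
def Claim_equal_deque_slice : Prop := ∀ (dq : List Int) (start : Option Int) (end_ : Option Int), Dom_deque_slice dq start end_ → Spec_deque_slice dq start end_ (deque_slice dq start end_)

-- ===== LEMMAS AND PROOFS =====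

-- A's comprehension over range(a, b) equals a drop/take, for the normalized bounds
-- A produces (0 ≤ a and b ≤ len dq).
lemma map_pyGetD_pyRange_eq_droptake (xs : List Int) (a b : Int)
    (h0 : 0 ≤ a) (hb : b ≤ (xs.length : Int)) :
    (PySem.List.pyRange a b 1).map (fun i => PySem.List.pyGetD xs i 0)
      = (xs.drop a.toNat).take (b - a).toNat := by
  rw [PySem.List.pyRange_one, List.map_map]
  apply List.ext_getElem
  · simp only [List.length_map, List.length_range, List.length_take, List.length_drop]
    omega
  · intro k h1 h2
    simp only [List.getElem_map, List.getElem_range, Function.comp_apply,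
      List.getElem_take, List.getElem_drop]
    have hlen : k < (b - a).toNat := by
      simpa only [List.length_map, List.length_range] using h1
    rw [PySem.List.pyGetD_eq_getElem xs 0 (by omega) (by omega)]
    congr 1
    omega

-- Two drop/take windows over the same list coincide when their clamped endpoints do.
lemma droptake_ext {α : Type} (xs : List α) (p t p' t' : Nat)
    (h1 : min p xs.length = min p' xs.length)
    (h2 : min (p + t) xs.length = min (p' + t') xs.length) :
    (xs.drop p).take t = (xs.drop p').take t' := by
  apply List.ext_getElem
  · simp only [List.length_take, List.length_drop]; omega
  · intro k hk hk'
    simp only [List.length_take, List.length_drop] at hk hk'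
    simp only [List.getElem_take, List.getElem_drop]
    congr 1
    omega

-- ===== VERDICT (by name: the statement is the Claim_ definition above) =====
theorem deque_slice_spec : Claim_equal_deque_slice := by
  intro dq start end_ _
  unfold Spec_deque_slice deque_slice deque_slice_alt PySem.List.slice PySem.List.clampIdx
  rcases start with _ | s <;> rcases end_ with _ | e <;>
    simp only [] <;> split_ifs <;>
    (rw [map_pyGetD_pyRange_eq_droptake _ _ _ (by omega) (by omega)];
     apply droptake_ext <;> omega)
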